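-- pv_equiv track=rewrite | github.com/ryanwaynehenry/CLARE | autokg.py | unify_directional_relationships
-- ===== SOURCE A (Python) =====
-- def unify_directional_relationships(pair_edges):
--     """
--     Unifies known inverse relationship phrases into a canonical edge.
--     Each edge is a tuple (entity1, relationship, entity2, direction).
--     """
--     unique_edges = []
--     for e in pair_edges:
--         if e not in unique_edges:
--             unique_edges.append(e)
--     inverse_map = {
--         "employs": "employed by",
--         "manages": "managed by",
--         "father of": "child of",
--         # Extend mapping as needed.
--     }
--     final_edges = []
--     used = set()
--     for (sub, rel, obj, direction) in unique_edges:
--         if (sub, rel, obj, direction) in used: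
--             continue
--         inv = inverse_map.get(rel)
--         if inv and (sub, inv, obj, direction) in unique_edges:
--             chosen = (sub, rel, obj, direction)
--             final_edges.append(chosen)
--             used.add(chosen)
--             used.add((sub, inv, obj, direction))
--         else:
--             final_edges.append((sub, rel, obj, direction))
--             used.add((sub, rel, obj, direction))
--     return final_edges
-- ===== SOURCE B (Python) =====
-- def unify_directional_relationships(pair_edges):
--     """
--     Unifies known inverse relationship phrases into a canonical edge.
--     Each edge is a tuple (entity1, relationship, entity2, direction).
--     """
--     inverse_map = {
--         "employs": "employed by",
--         "manages": "managed by",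
--         "father of": "child of",
--         # Extend mapping as needed.
--     }
--     back_to_fwd = {v: k for k, v in inverse_map.items()}
--     # first-occurrence index of every distinct edge (also deduplicates, in order)
--     order = {}
--     for e in pair_edges:
--         order.setdefault(e, len(order))
--     result = []
--     for (sub, rel, obj, direction) in order:
--         fwd = back_to_fwd.get(rel)
--         if fwd is None or (sub, fwd, obj, direction) not in order \
--                 or order[(sub, fwd, obj, direction)] > order[(sub, rel, obj, direction)]:
--             result.append((sub, rel, obj, direction))
--     return result
-- ===== Notes on version B (the rewrite author's own statement) =====
-- stated objective: alternative
-- what changed: A deduplicates into a list with O(n) membership scans and then runs a stateful second loop that looks ahead for an inverse partner and maintains a dual-purpose `used` set; B builds a dict of first-occurrence indices in one pass (which also deduplicates) and then returns a pure filter of its keys, keeping an edge unless its relation is a backward phrase whose forward partner has a smaller index.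
import Mathlib
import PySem

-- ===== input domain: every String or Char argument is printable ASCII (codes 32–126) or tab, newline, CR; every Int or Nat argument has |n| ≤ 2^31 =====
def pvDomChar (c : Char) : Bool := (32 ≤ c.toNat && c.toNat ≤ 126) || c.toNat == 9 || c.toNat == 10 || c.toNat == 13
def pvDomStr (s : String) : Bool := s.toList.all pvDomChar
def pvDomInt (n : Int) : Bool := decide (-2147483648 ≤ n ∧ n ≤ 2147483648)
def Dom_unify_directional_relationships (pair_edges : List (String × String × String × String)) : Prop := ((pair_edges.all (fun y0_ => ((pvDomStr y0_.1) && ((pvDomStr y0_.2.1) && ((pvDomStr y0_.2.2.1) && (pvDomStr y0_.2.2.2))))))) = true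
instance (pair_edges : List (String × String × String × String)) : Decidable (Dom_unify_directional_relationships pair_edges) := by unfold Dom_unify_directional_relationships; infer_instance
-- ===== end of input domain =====

-- B replaces A's stateful two-loop scheme (list dedup with O(n) membership scans, then a lookahead
-- loop maintaining a dual-purpose `used` set) by a dict of first-occurrence indices built in one
-- pass plus a pure filter of its keys that compares positions (objective: alternative decomposition).

abbrev PvEdge := String × String × String × String

-- the inverse-relationship dict literal both Pythons contain
def pvInvMap : PySem.Dict String String :=
  PySem.Dict.ofList [("employs","employed by"),("manages","managed by"),("father of","child of")]

-- ===== PORT A =====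
-- second loop body of A, closed over unique_edges (the `in unique_edges` check)
def pvAStep (uniq : List PvEdge) (st : List PvEdge × PySem.Set PvEdge) (e : PvEdge) :
    List PvEdge × PySem.Set PvEdge :=
  match e with
  | (sub, rel, obj, direction) =>
    if (sub, rel, obj, direction) ∈ st.2 then st
    else
      match pvInvMap.get? rel with   -- `inv = inverse_map.get(rel)`; values are non-empty, so `if inv` = isSome
      | some inv =>
        if (sub, inv, obj, direction) ∈ uniq then
          (st.1 ++ [(sub, rel, obj, direction)],
           PySem.Set.add (PySem.Set.add st.2 (sub, rel, obj, direction)) (sub, inv, obj, direction))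
        else (st.1 ++ [(sub, rel, obj, direction)], PySem.Set.add st.2 (sub, rel, obj, direction))
      | none => (st.1 ++ [(sub, rel, obj, direction)], PySem.Set.add st.2 (sub, rel, obj, direction))

def unify_directional_relationships (pair_edges : List PvEdge) : List PvEdge :=
  let unique_edges := pair_edges.foldl (fun acc e => if e ∈ acc then acc else acc ++ [e]) []
  (unique_edges.foldl (pvAStep unique_edges) ([], PySem.Set.empty)).1

-- ===== PORT B =====
-- back_to_fwd = {v: k for k, v in inverse_map.items()}
def pvRevMap : PySem.Dict String String :=
  PySem.Dict.ofList (pvInvMap.items.map (fun p => (p.2, p.1)))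

-- keep test of B's filter loop; every filtered edge is a key of `order`, so Python's
-- order[(sub, rel, obj, direction)] never raises and getD … 0 is exact here
def pvKeep (order : PySem.Dict PvEdge Int) (e : PvEdge) : Bool :=
  match pvRevMap.get? e.2.1 with
  | none => true
  | some fwd =>
    match order.get? (e.1, fwd, e.2.2.1, e.2.2.2) with
    | none => true
    | some ip => decide (order.getD e 0 < ip)

def unify_directional_relationships_alt (pair_edges : List PvEdge) : List PvEdge :=
  let order := pair_edges.foldl (fun d e => d.setdefault e (d.size : Int)) PySem.Dict.empty
  order.keys.filter (pvKeep order)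

-- ===== PRECONDITION & SPEC =====
def Spec_unify_directional_relationships (pair_edges : List (String × String × String × String)) (out : List (String × String × String × String)) : Prop := out = unify_directional_relationships_alt pair_edges
instance (pair_edges : List (String × String × String × String)) (out : List (String × String × String × String)) : Decidable (Spec_unify_directional_relationships pair_edges out) := by unfold Spec_unify_directional_relationships; infer_instance

-- ===== CLAIM (what is proved, stated in full; the proofs are below) =====
def Claim_equal_unify_directional_relationships : Prop := ∀ (pair_edges : List (String × String × String × String)), Dom_unify_directional_relationships pair_edges → Spec_unify_directional_relationships pair_edges (unify_directional_relationships pair_edges)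

-- ===== LEMMAS AND PROOFS =====

-- common abstraction both ports are reduced to: over the deduped list, with processed prefix S,
-- emit e unless its relation is a backward phrase whose forward partner lies in S
def pvCore (S : List PvEdge) : List PvEdge → List PvEdge
  | [] => []
  | e :: l =>
    if e ∈ S then pvCore S l
    else
      (match pvRevMap.get? e.2.1 with
       | some f => if (e.1, f, e.2.2.1, e.2.2.2) ∈ S then [] else [e]
       | none => [e]) ++ pvCore (PySem.Set.add S e) l

-- pure recursive form of A's dedup fold: the elements appended to acc
def pvU (S : List PvEdge) : List PvEdge → List PvEdge
  | [] => []
  | e :: l => if e ∈ S then pvU S l else e :: pvU (S ++ [e]) l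

-- association list pairing each element with its position, starting at n
def pvIdx : List PvEdge → Int → List (PvEdge × Int)
  | [], _ => []
  | e :: l, n => (e, n) :: pvIdx l (n + 1)

-- "A's used-set would skip e": e is a backward edge whose forward edge lies in the prefix p
def pvSkip (p : List PvEdge) (e : PvEdge) : Prop :=
  ∃ f, pvRevMap.get? e.2.1 = some f ∧ (e.1, f, e.2.2.1, e.2.2.2) ∈ p

theorem pvRevMap_eq : pvRevMap = PySem.Dict.mk [("employed by","employs"),("managed by","manages"),("child of","father of")] := by decide

-- F2: a backward phrase maps back to its forward phrase
theorem pv_rev_inv (r f : String) (h : pvRevMap.get? r = some f) : pvInvMap.get? f = some r := by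
  rw [pvRevMap_eq] at h
  simp only [PySem.Dict.get?_mk_cons] at h
  split at h
  · next heq => simp at h heq; subst h; rw [show r = "employed by" from heq.symm]; decide
  · split at h
    · next heq => simp at h heq; subst h; rw [show r = "managed by" from heq.symm]; decide
    · split at h
      · next heq => simp at h heq; subst h; rw [show r = "child of" from heq.symm]; decide
      · simp [PySem.Dict.get?] at h

-- F1: a forward phrase's value maps back to the forward phrase
theorem pv_inv_rev (r v : String) (h : pvInvMap.get? r = some v) : pvRevMap.get? v = some r := by
  have hi : pvInvMap = PySem.Dict.mk [("employs","employed by"),("manages","managed by"),("father of","child of")] := by decide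
  rw [hi] at h
  simp only [PySem.Dict.get?_mk_cons] at h
  split at h
  · next heq => simp at h heq; subst h; rw [show r = "employs" from heq.symm]; decide
  · split at h
    · next heq => simp at h heq; subst h; rw [show r = "manages" from heq.symm]; decide
    · split at h
      · next heq => simp at h heq; subst h; rw [show r = "father of" from heq.symm]; decide
      · simp [PySem.Dict.get?] at h

-- F4: no phrase is both a forward key and a backward value
theorem pv_not_both (r v : String) (h : pvInvMap.get? r = some v) : pvRevMap.get? r = none := by
  have hi : pvInvMap = PySem.Dict.mk [("employs","employed by"),("manages","managed by"),("father of","child of")] := by decide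
  rw [hi] at h
  simp only [PySem.Dict.get?_mk_cons] at h
  split at h
  · next heq => simp at heq; subst heq; decide
  · split at h
    · next heq => simp at heq; subst heq; decide
    · split at h
      · next heq => simp at heq; subst heq; decide
      · simp [PySem.Dict.get?] at h

-- F5: the backward map has no fixpoint
theorem pv_rev_ne (r f : String) (h : pvRevMap.get? r = some f) : f ≠ r := by
  intro hrf
  subst hrf
  have := pv_not_both f f (pv_rev_inv f f h)
  rw [this] at h
  simp at h

-- A's dedup fold is acc ++ pvU
theorem pvU_fold (l : List PvEdge) : ∀ acc,
    l.foldl (fun acc e => if e ∈ acc then acc else acc ++ [e]) acc = acc ++ pvU acc l := by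
  induction l with
  | nil => intro acc; simp [pvU]
  | cons e l ih =>
    intro acc
    simp only [List.foldl_cons, pvU]
    by_cases h : e ∈ acc
    · simp [h, ih]
    · simp [h, ih (acc ++ [e])]

theorem pvU_nodup (l : List PvEdge) : ∀ S, S.Nodup → (S ++ pvU S l).Nodup := by
  induction l with
  | nil => intro S hS; simpa [pvU]
  | cons e l ih =>
    intro S hS
    simp only [pvU]
    by_cases h : e ∈ S
    · simp [h]; exact ih S hS
    · have hSe : (S ++ [e]).Nodup :=
        hS.append (List.nodup_singleton e) (fun a haS hae => h ((List.mem_singleton.mp hae) ▸ haS))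
      have := ih (S ++ [e]) hSe
      simpa [h, List.append_assoc] using this

-- main invariant for A's second loop: over the nodup list U = p ++ rest, `used` holds exactly the
-- backward edges whose forward edge lies in the processed prefix p
theorem pvA_loop (U : List PvEdge) (hU : U.Nodup) : ∀ (rest p res used : List PvEdge),
    U = p ++ rest →
    (∀ x ∈ rest, (x ∈ used ↔ pvSkip p x)) →
    (rest.foldl (pvAStep U) (res, used)).1 = res ++ pvCore p rest := by
  intro rest
  induction rest with
  | nil => intro p res used _ _; simp [pvCore]
  | cons e rest ih =>
    intro p res used hsplit hinv
    obtain ⟨s, r, o, d⟩ := e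
    have hnd : (p ++ (s,r,o,d) :: rest).Nodup := hsplit ▸ hU
    have hep : (s,r,o,d) ∉ p := fun hp => (List.disjoint_of_nodup_append hnd) hp List.mem_cons_self
    have herest : (s,r,o,d) ∉ rest := by
      have h2 := (List.nodup_append.mp hnd).2.1
      exact (List.nodup_cons.mp h2).1
    have hrestU : ∀ x ∈ rest, x ∈ U := by
      intro x hx; rw [hsplit]; exact List.mem_append_right _ (List.mem_cons_of_mem _ hx)
    have hsplit' : U = (p ++ [(s,r,o,d)]) ++ rest := by rw [hsplit]; simp
    have haddp : PySem.Set.add p (s,r,o,d) = p ++ [(s,r,o,d)] := PySem.Set.add_of_not_mem hep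
    -- pvSkip over the grown prefix, generic pieces
    have hmono : ∀ x, pvSkip p x → pvSkip (p ++ [(s,r,o,d)]) x := by
      rintro x ⟨g, hg, hgp⟩; exact ⟨g, hg, List.mem_append_left _ hgp⟩
    -- if x's forward edge is e itself then x = (s, inv, o, d) for the inv with pvInvMap.get? r = some inv
    have hfwd_e : ∀ x g, pvRevMap.get? x.2.1 = some g → (x.1, g, x.2.2.1, x.2.2.2) = (s,r,o,d) →
        pvInvMap.get? r = some x.2.1 ∧ x = (s, x.2.1, o, d) := by
      intro x g hg heq
      obtain ⟨x1, x2, x3, x4⟩ := x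
      simp only [Prod.mk.injEq] at heq
      obtain ⟨rfl, rfl, rfl, rfl⟩ := heq
      exact ⟨pv_rev_inv _ _ hg, rfl⟩
    by_cases hu : (s,r,o,d) ∈ used
    · -- A skips e; core emits nothing for e
      obtain ⟨f, hf, hfp⟩ := (hinv _ List.mem_cons_self).mp hu
      simp only at hf hfp
      have hinv' : ∀ x ∈ rest, x ∈ used ↔ pvSkip (p ++ [(s,r,o,d)]) x := by
        intro x hx
        rw [hinv x (List.mem_cons_of_mem _ hx)]
        constructor
        · exact hmono x
        · rintro ⟨g, hg, hgp⟩
          rcases List.mem_append.mp hgp with h1 | h1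
          · exact ⟨g, hg, h1⟩
          · exfalso
            have h2 := (hfwd_e x g hg (List.mem_singleton.mp h1)).1
            rw [pv_not_both r x.2.1 h2] at hf
            simp at hf
      have hL : ((( s,r,o,d) :: rest).foldl (pvAStep U) (res, used)) = rest.foldl (pvAStep U) (res, used) := by
        simp only [List.foldl_cons, pvAStep, hu, if_pos]
      rw [hL, ih (p ++ [(s,r,o,d)]) res used hsplit' hinv']
      simp [pvCore, hep, hf, hfp]
    · -- A emits e; core emits e
      have hnskip : ¬ pvSkip p (s,r,o,d) := fun h => hu ((hinv _ List.mem_cons_self).mpr h)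
      have hemit : (match pvRevMap.get? r with
           | some f => if ((s, f, o, d) : PvEdge) ∈ p then ([] : List PvEdge) else [(s,r,o,d)]
           | none => [(s,r,o,d)]) = [(s,r,o,d)] := by
        cases hf : pvRevMap.get? r with
        | none => rfl
        | some f =>
          have hnp : ((s, f, o, d) : PvEdge) ∉ p := fun hm => hnskip ⟨f, hf, hm⟩
          simp [hnp]
      have hcore : pvCore p ((s,r,o,d) :: rest) = (s,r,o,d) :: pvCore (p ++ [(s,r,o,d)]) rest := by
        simp only [pvCore]
        rw [if_neg hep, haddp, hemit]
        rfl
      cases hi : pvInvMap.get? r with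
      | none =>
        have hinv' : ∀ x ∈ rest, x ∈ PySem.Set.add used (s,r,o,d) ↔ pvSkip (p ++ [(s,r,o,d)]) x := by
          intro x hx
          rw [PySem.Set.mem_add]
          constructor
          · rintro (hxu | rfl)
            · exact hmono x ((hinv x (List.mem_cons_of_mem _ hx)).mp hxu)
            · exact absurd hx herest
          · rintro ⟨g, hg, hgp⟩
            rcases List.mem_append.mp hgp with h1 | h1
            · exact Or.inl ((hinv x (List.mem_cons_of_mem _ hx)).mpr ⟨g, hg, h1⟩)
            · exfalso
              have h2 := (hfwd_e x g hg (List.mem_singleton.mp h1)).1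
              rw [hi] at h2; simp at h2
        have hL : ((( s,r,o,d) :: rest).foldl (pvAStep U) (res, used)) =
            rest.foldl (pvAStep U) (res ++ [(s,r,o,d)], PySem.Set.add used (s,r,o,d)) := by
          simp only [List.foldl_cons, pvAStep, hu, if_false, hi]
        rw [hL, ih (p ++ [(s,r,o,d)]) _ _ hsplit' hinv', hcore]
        simp
      | some inv =>
        by_cases hpU : ((s, inv, o, d) : PvEdge) ∈ U
        · -- partner present: both e and its partner enter used
          have hinv' : ∀ x ∈ rest, x ∈ PySem.Set.add (PySem.Set.add used (s,r,o,d)) (s, inv, o, d) ↔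
              pvSkip (p ++ [(s,r,o,d)]) x := by
            intro x hx
            rw [PySem.Set.mem_add, PySem.Set.mem_add]
            constructor
            · rintro ((hxu | rfl) | rfl)
              · exact hmono x ((hinv x (List.mem_cons_of_mem _ hx)).mp hxu)
              · exact absurd hx herest
              · exact ⟨r, by simpa using pv_inv_rev r inv hi, List.mem_append_right _ List.mem_cons_self⟩
            · rintro ⟨g, hg, hgp⟩
              rcases List.mem_append.mp hgp with h1 | h1
              · exact Or.inl (Or.inl ((hinv x (List.mem_cons_of_mem _ hx)).mpr ⟨g, hg, h1⟩))
              · obtain ⟨h2, h3⟩ := hfwd_e x g hg (List.mem_singleton.mp h1)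
                rw [hi] at h2
                have : x.2.1 = inv := by simpa using h2.symm
                exact Or.inr (by rw [h3, this])
          have hL : ((( s,r,o,d) :: rest).foldl (pvAStep U) (res, used)) =
              rest.foldl (pvAStep U) (res ++ [(s,r,o,d)],
                PySem.Set.add (PySem.Set.add used (s,r,o,d)) (s, inv, o, d)) := by
            simp only [List.foldl_cons, pvAStep, hu, if_false, hi, hpU, if_pos]
          rw [hL, ih (p ++ [(s,r,o,d)]) _ _ hsplit' hinv', hcore]
          simp
        · -- partner absent from U: only e enters used
          have hinv' : ∀ x ∈ rest, x ∈ PySem.Set.add used (s,r,o,d) ↔ pvSkip (p ++ [(s,r,o,d)]) x := by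
            intro x hx
            rw [PySem.Set.mem_add]
            constructor
            · rintro (hxu | rfl)
              · exact hmono x ((hinv x (List.mem_cons_of_mem _ hx)).mp hxu)
              · exact absurd hx herest
            · rintro ⟨g, hg, hgp⟩
              rcases List.mem_append.mp hgp with h1 | h1
              · exact Or.inl ((hinv x (List.mem_cons_of_mem _ hx)).mpr ⟨g, hg, h1⟩)
              · exfalso
                obtain ⟨h2, h3⟩ := hfwd_e x g hg (List.mem_singleton.mp h1)
                rw [hi] at h2
                have hxinv : x.2.1 = inv := by simpa using h2.symm
                exact hpU (by rw [← hxinv, ← h3]; exact hrestU x hx)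
          have hL : ((( s,r,o,d) :: rest).foldl (pvAStep U) (res, used)) =
              rest.foldl (pvAStep U) (res ++ [(s,r,o,d)], PySem.Set.add used (s,r,o,d)) := by
            simp only [List.foldl_cons, pvAStep, hu, if_false, hi, hpU]
          rw [hL, ih (p ++ [(s,r,o,d)]) _ _ hsplit' hinv', hcore]
          simp

-- B's setdefault fold builds exactly the deduped list paired with its positions
theorem pvOrder_fold (l : List PvEdge) : ∀ (es : List (PvEdge × Int)),
    l.foldl (fun d e => d.setdefault e (d.size : Int)) (PySem.Dict.mk es) =
      PySem.Dict.mk (es ++ pvIdx (pvU (es.map Prod.fst) l) (es.length : Int)) := by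
  induction l with
  | nil => intro es; simp [pvU, pvIdx]
  | cons e l ih =>
    intro es
    have hkeys : (PySem.Dict.mk es).keys = es.map Prod.fst := rfl
    by_cases h : e ∈ es.map Prod.fst
    · have hc : (PySem.Dict.mk es).contains e = true := by
        rw [PySem.Dict.contains_eq_decide_mem_keys, hkeys]; exact decide_eq_true h
      simp only [List.foldl_cons, PySem.Dict.setdefault_of_contains _ _ hc]
      rw [ih es]
      simp [pvU, h]
    · have hc : (PySem.Dict.mk es).contains e = false := by
        rw [PySem.Dict.contains_eq_decide_mem_keys, hkeys]; exact decide_eq_false h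
      have hins : (PySem.Dict.mk es).setdefault e ((PySem.Dict.mk es).size : Int) =
          PySem.Dict.mk (es ++ [(e, (es.length : Int))]) := by
        rw [PySem.Dict.setdefault_of_not_contains _ _ hc]
        apply PySem.Dict.ext
        rw [PySem.Dict.items_insert_of_not_contains _ _ hc]
        rfl
      simp only [List.foldl_cons, hins]
      rw [ih (es ++ [(e, (es.length : Int))])]
      have h2 : ((es ++ [(e, (es.length : Int))]).length : Int) = (es.length : Int) + 1 := by
        simp
      rw [h2]
      apply PySem.Dict.ext
      simp [pvU, h, pvIdx, List.append_assoc]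

theorem pvIdx_map_fst (U : List PvEdge) : ∀ n, (pvIdx U n).map Prod.fst = U := by
  induction U with
  | nil => intro n; rfl
  | cons e l ih => intro n; simp [pvIdx, ih]

theorem pvIdx_get?_mem (p : List PvEdge) : ∀ (l : List PvEdge) (n : Int) (x : PvEdge), x ∉ p →
    (PySem.Dict.mk (pvIdx (p ++ x :: l) n)).get? x = some (n + (p.length : Int)) := by
  induction p with
  | nil =>
    intro l n x _
    simp only [List.nil_append, pvIdx, PySem.Dict.get?_mk_cons]
    simp
  | cons h p ih =>
    intro l n x hx
    have hne : h ≠ x := fun hh => hx (hh ▸ List.mem_cons_self)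
    simp only [List.cons_append, pvIdx, PySem.Dict.get?_mk_cons]
    rw [if_neg (by simpa using hne)]
    rw [ih l (n + 1) x (fun hm => hx (List.mem_cons_of_mem _ hm))]
    congr 1
    simp only [List.length_cons]
    push_cast
    ring

theorem pvIdx_get?_not_mem (U : List PvEdge) : ∀ (n : Int) (x : PvEdge), x ∉ U →
    (PySem.Dict.mk (pvIdx U n)).get? x = none := by
  induction U with
  | nil => intro n x _; rfl
  | cons e l ih =>
    intro n x hx
    simp only [pvIdx, PySem.Dict.get?_mk_cons]
    rw [if_neg (by simp; exact fun hh => hx (hh ▸ List.mem_cons_self))]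
    exact ih (n + 1) x (fun hm => hx (List.mem_cons_of_mem _ hm))

-- B's filter over the deduped list U is pvCore, prefix by prefix
theorem pvB_filter (U : List PvEdge) (hU : U.Nodup) : ∀ (l p : List PvEdge),
    U = p ++ l → l.filter (pvKeep (PySem.Dict.mk (pvIdx U 0))) = pvCore p l := by
  intro l
  induction l with
  | nil => intro p _; rfl
  | cons e l ih =>
    intro p hsplit
    have hnd : (p ++ e :: l).Nodup := hsplit ▸ hU
    have hep : e ∉ p := fun hp => (List.disjoint_of_nodup_append hnd) hp List.mem_cons_self
    have haddp : PySem.Set.add p e = p ++ [e] := PySem.Set.add_of_not_mem hep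
    have hsplit' : U = (p ++ [e]) ++ l := by rw [hsplit]; simp
    have hgete : (PySem.Dict.mk (pvIdx U 0)).get? e = some (0 + (p.length : Int)) := by
      rw [hsplit]; exact pvIdx_get?_mem p l 0 e hep
    have hgetD : (PySem.Dict.mk (pvIdx U 0)).getD e 0 = (p.length : Int) := by
      rw [PySem.Dict.getD_of_get?_eq_some _ _ hgete]; ring
    have hrec := ih (p ++ [e]) hsplit'
    cases hf : pvRevMap.get? e.2.1 with
    | none =>
      have hkeep : pvKeep (PySem.Dict.mk (pvIdx U 0)) e = true := by
        simp [pvKeep, hf]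
      simp only [List.filter_cons, hkeep, if_true, pvCore, if_neg hep, hf, haddp,
        List.singleton_append]
      rw [hrec]
    | some f =>
      have hptne : (e.1, f, e.2.2.1, e.2.2.2) ≠ e := fun hq =>
        pv_rev_ne _ _ hf (congrArg (fun x : PvEdge => x.2.1) hq)
      by_cases hptp : (e.1, f, e.2.2.1, e.2.2.2) ∈ p
      · -- partner earlier: B filters e out, core emits []
        obtain ⟨p1, p2, rfl⟩ := List.append_of_mem hptp
        have hpnd : (p1 ++ (e.1, f, e.2.2.1, e.2.2.2) :: p2).Nodup := (List.nodup_append.mp hnd).1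
        have hpt1 : (e.1, f, e.2.2.1, e.2.2.2) ∉ p1 := fun hm =>
          (List.disjoint_of_nodup_append hpnd) hm List.mem_cons_self
        have heqU : U = p1 ++ (e.1, f, e.2.2.1, e.2.2.2) :: (p2 ++ e :: l) := by
          rw [hsplit]; simp
        have hgetpt : (PySem.Dict.mk (pvIdx U 0)).get? (e.1, f, e.2.2.1, e.2.2.2) =
            some (0 + (p1.length : Int)) := by
          rw [heqU]; exact pvIdx_get?_mem p1 _ 0 _ hpt1
        have hkeep : pvKeep (PySem.Dict.mk (pvIdx U 0)) e = false := by
          simp only [pvKeep, hf, hgetpt, hgetD]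
          rw [decide_eq_false]
          simp only [List.length_append, List.length_cons]
          push_cast
          omega
        simp only [List.filter_cons, hkeep, Bool.false_eq_true, if_false, pvCore,
          if_neg hep, hf, if_pos hptp, haddp, List.nil_append]
        exact hrec
      · by_cases hptU : (e.1, f, e.2.2.1, e.2.2.2) ∈ U
        · -- partner later: B keeps e, core emits [e]
          have hptl : (e.1, f, e.2.2.1, e.2.2.2) ∈ l := by
            rw [hsplit] at hptU
            rcases List.mem_append.mp hptU with h1 | h1
            · exact absurd h1 hptp
            · rcases List.mem_cons.mp h1 with h2 | h2
              · exact absurd h2 hptne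
              · exact h2
          obtain ⟨l1, l2, rfl⟩ := List.append_of_mem hptl
          have heqU : U = (p ++ e :: l1) ++ (e.1, f, e.2.2.1, e.2.2.2) :: l2 := by
            rw [hsplit]; simp
          have hnd2 : ((p ++ e :: l1) ++ (e.1, f, e.2.2.1, e.2.2.2) :: l2).Nodup := heqU ▸ hU
          have hptpre : (e.1, f, e.2.2.1, e.2.2.2) ∉ p ++ e :: l1 := fun hm =>
            (List.disjoint_of_nodup_append hnd2) hm List.mem_cons_self
          have hgetpt : (PySem.Dict.mk (pvIdx U 0)).get? (e.1, f, e.2.2.1, e.2.2.2) =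
              some (0 + ((p ++ e :: l1).length : Int)) := by
            rw [heqU]; exact pvIdx_get?_mem _ _ 0 _ hptpre
          have hkeep : pvKeep (PySem.Dict.mk (pvIdx U 0)) e = true := by
            simp only [pvKeep, hf, hgetpt, hgetD]
            rw [decide_eq_true]
            simp only [List.length_append, List.length_cons]
            push_cast
            omega
          simp only [List.filter_cons, hkeep, if_true, pvCore, if_neg hep, hf,
            if_neg hptp, haddp, List.singleton_append]
          rw [hrec]
        · -- partner absent: B keeps e, core emits [e]
          have hkeep : pvKeep (PySem.Dict.mk (pvIdx U 0)) e = true := by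
            simp [pvKeep, hf, pvIdx_get?_not_mem U 0 _ hptU]
          simp only [List.filter_cons, hkeep, if_true, pvCore, if_neg hep, hf,
            if_neg hptp, haddp, List.singleton_append]
          rw [hrec]

-- ===== VERDICT (by name: the statement is the Claim_ definition above) =====
theorem unify_directional_relationships_spec : Claim_equal_unify_directional_relationships := by
  intro pair_edges _
  unfold Spec_unify_directional_relationships unify_directional_relationships unify_directional_relationships_alt
  have huniq : pair_edges.foldl (fun acc e => if e ∈ acc then acc else acc ++ [e]) [] = pvU [] pair_edges := by
    simpa using pvU_fold pair_edges []
  have hnd : (pvU [] pair_edges).Nodup := by simpa using pvU_nodup pair_edges [] List.nodup_nil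
  have horder : pair_edges.foldl (fun d e => d.setdefault e (d.size : Int)) PySem.Dict.empty =
      PySem.Dict.mk (pvIdx (pvU [] pair_edges) 0) := by
    have := pvOrder_fold pair_edges []
    simpa [PySem.Dict.empty] using this
  simp only [PySem.Set.empty, huniq, horder]
  rw [pvA_loop (pvU [] pair_edges) hnd (pvU [] pair_edges) [] [] [] rfl
        (by intro x hx; simp [pvSkip])]
  have hkeys : (PySem.Dict.mk (pvIdx (pvU [] pair_edges) 0)).keys = pvU [] pair_edges := by
    show (pvIdx (pvU [] pair_edges) 0).map Prod.fst = _
    exact pvIdx_map_fst _ 0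
  rw [hkeys, pvB_filter (pvU [] pair_edges) hnd (pvU [] pair_edges) [] rfl]
  simp
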